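-- pv_equiv track=rewrite | github.com/margarita0303/BioinformaticsAlgorithms | homework_2022.03.04/2.2.8.py | PatternAppearsInEachDnaWithAtMostDMismatches
-- ===== SOURCE A (Python) =====
-- def HammingDistance(pattern1, pattern2):
--     count = 0
--     for s1, s2 in zip(pattern1, pattern2):
--         if s1 != s2:
--             count += 1
--     return count
--
-- def PatternAppearsInEachDnaWithAtMostDMismatches(pattern, Dna, d):
--     isAppears = []
--     for j in range(0, len(Dna)):
--         isAppears.append(False)
--         string = Dna[j]
--         for i in range(0, len(string) - len(pattern) + 1):
--             if HammingDistance(string[i:i+len(pattern)], pattern) <= d: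
--                 isAppears[j] = True
--                 break
--     for j in isAppears:
--         if j == False:
--             return False
--     return True
-- ===== SOURCE B (Python) =====
-- def PatternAppearsInEachDnaWithAtMostDMismatches(pattern, Dna, d):
--     m = len(pattern)
--     # index: pattern character -> list of positions where it occurs in the pattern
--     pos = {}
--     for k, c in enumerate(pattern):
--         pos.setdefault(c, []).append(k)
--     need = m - d  # a window appears iff it MATCHES the pattern in at least m - d positions
--
--     def appears(s):
--         w = len(s) - m + 1
--         matches = [0] * w  # matches[i] = number of positions where window i agrees with pattern
--         for j, c in enumerate(s):
--             for k in pos.get(c, []):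
--                 i = j - k
--                 if 0 <= i < w:
--                     matches[i] += 1
--         return any(v >= need for v in matches)
--
--     return all(appears(s) for s in Dna)
-- ===== Notes on version B (the rewrite author's own statement) =====
-- stated objective: alternative
-- what changed: Instead of sliding the pattern over each string and computing a Hamming distance per window, B builds a dictionary index mapping each pattern character to its positions, makes one scatter pass over each string that increments a per-window match counter for every (character, pattern-position) hit, and accepts a string iff some window's match count reaches len(pattern)-d.
import Mathlib
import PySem

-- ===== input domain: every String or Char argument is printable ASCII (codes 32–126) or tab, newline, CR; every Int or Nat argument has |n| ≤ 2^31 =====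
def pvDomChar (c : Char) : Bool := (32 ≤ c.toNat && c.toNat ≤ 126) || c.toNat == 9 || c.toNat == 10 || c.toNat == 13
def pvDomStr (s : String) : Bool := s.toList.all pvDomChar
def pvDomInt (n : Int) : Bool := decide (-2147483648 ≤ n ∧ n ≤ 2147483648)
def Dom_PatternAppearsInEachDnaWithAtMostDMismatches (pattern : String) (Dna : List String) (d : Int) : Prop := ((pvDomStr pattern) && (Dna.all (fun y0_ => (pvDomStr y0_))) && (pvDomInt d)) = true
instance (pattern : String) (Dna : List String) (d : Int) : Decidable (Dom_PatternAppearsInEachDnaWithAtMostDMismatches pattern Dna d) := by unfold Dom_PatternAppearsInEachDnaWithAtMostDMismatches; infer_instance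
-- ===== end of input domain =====

-- B replaces A's per-window slice-and-Hamming scan with a pattern-position index (char -> positions)
-- and a per-string match-counter array filled by one scatter pass over the string; a different
-- algorithm of the same worst-case cost (alternative).

-- ===== PORT A =====
-- HammingDistance: zip the two strings and count differing positions.
def pvHamming (p1 p2 : String) : Int :=
  (p1.toList.zip p2.toList).foldl (fun count sp => if sp.1 ≠ sp.2 then count + 1 else count) 0

-- inner 'for i in range(...)' with break: first window within distance d sets the flag to True.
def pvInnerA (pattern string : String) (d : Int) : List Int → Bool
  | [] => false
  | i :: rest =>
    if pvHamming (PySem.Str.slice string (some i) (some (i + PySem.Str.len pattern))) pattern ≤ d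
    then true
    else pvInnerA pattern string d rest

-- final 'for j in isAppears: if j == False: return False' loop.
def pvCheckA : List Bool → Bool
  | [] => true
  | j :: rest => if j = false then false else pvCheckA rest

def PatternAppearsInEachDnaWithAtMostDMismatches (pattern : String) (Dna : List String) (d : Int) : Bool :=
  -- 'for j in range(0, len(Dna)): isAppears.append(False); string = Dna[j]; …' visits the strings in order.
  let isAppears := Dna.foldl (fun acc string =>
    acc ++ [pvInnerA pattern string d
      (PySem.List.pyRange 0 (PySem.Str.len string - PySem.Str.len pattern + 1) 1)]) []
  pvCheckA isAppears

-- ===== PORT B =====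
-- 'for k, c in enumerate(pattern): pos.setdefault(c, []).append(k)'
def pvBuildPos (pL : List Char) : PySem.Dict Char (List Int) :=
  (PySem.List.enumerate pL 0).foldl (fun d p => d.modify p.2 ([] : List Int) (fun v => v ++ [p.1])) PySem.Dict.empty

-- 'i = j - k; if 0 <= i < w: matches[i] += 1'  (the guard makes the index a valid Nat position)
def pvIncr (w : Int) (M : List Int) (i : Int) : List Int :=
  if 0 ≤ i ∧ i < w then M.set i.toNat (M.getD i.toNat 0 + 1) else M

-- 'def appears(s): …' closing over pos, m and need
def pvAppearsB (pos : PySem.Dict Char (List Int)) (m need : Int) (s : String) : Bool :=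
  let w := PySem.Str.len s - m + 1
  let mArr := (PySem.List.enumerate s.toList 0).foldl
    (fun M p => (pos.getD p.2 []).foldl (fun M k => pvIncr w M (p.1 - k)) M)
    (PySem.List.pyRepeat [(0 : Int)] w)
  mArr.any (fun v => decide (need ≤ v))

def PatternAppearsInEachDnaWithAtMostDMismatches_alt (pattern : String) (Dna : List String) (d : Int) : Bool :=
  let m := PySem.Str.len pattern
  let pos := pvBuildPos pattern.toList
  let need := m - d
  Dna.all (fun s => pvAppearsB pos m need s)

-- ===== PRECONDITION & SPEC =====
def Spec_PatternAppearsInEachDnaWithAtMostDMismatches (pattern : String) (Dna : List String) (d : Int) (out : Bool) : Prop := out = PatternAppearsInEachDnaWithAtMostDMismatches_alt pattern Dna d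
instance (pattern : String) (Dna : List String) (d : Int) (out : Bool) : Decidable (Spec_PatternAppearsInEachDnaWithAtMostDMismatches pattern Dna d out) := by unfold Spec_PatternAppearsInEachDnaWithAtMostDMismatches; infer_instance

-- ===== CLAIM (what is proved, stated in full; the proofs are below) =====
def Claim_equal_PatternAppearsInEachDnaWithAtMostDMismatches : Prop := ∀ (pattern : String) (Dna : List String) (d : Int), Dom_PatternAppearsInEachDnaWithAtMostDMismatches pattern Dna d → Spec_PatternAppearsInEachDnaWithAtMostDMismatches pattern Dna d (PatternAppearsInEachDnaWithAtMostDMismatches pattern Dna d)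

-- ===== LEMMAS AND PROOFS =====

-- A's final loop is List.all id.
theorem pvCheckA_eq_all (l : List Bool) : pvCheckA l = l.all id := by
  induction l with
  | nil => rfl
  | cons b rest ih => cases b <;> simp [pvCheckA, ih]

-- A's inner loop is an 'any' over the window starts.
theorem pvInnerA_eq_any (pattern string : String) (d : Int) (l : List Int) :
    pvInnerA pattern string d l
      = l.any (fun i =>
          pvHamming (PySem.Str.slice string (some i) (some (i + PySem.Str.len pattern))) pattern ≤ d) := by
  induction l with
  | nil => rfl
  | cons i rest ih =>
    by_cases h : (pvHamming (PySem.Str.slice string (some i) (some (i + PySem.Str.len pattern))) pattern ≤ d) <;>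
      simp [pvInnerA, ih]

-- pvHamming is a mismatch count over the zipped characters.
theorem pvHamming_eq_countP (p1 p2 : String) :
    pvHamming p1 p2 = ((p1.toList.zip p2.toList).countP (fun ab => !(ab.1 == ab.2)) : Int) := by
  unfold pvHamming
  rw [show (fun (count : Int) (sp : Char × Char) => if sp.1 ≠ sp.2 then count + 1 else count)
        = (fun count sp => if (fun ab : Char × Char => !(ab.1 == ab.2)) sp = true then count + 1 else count) by
    funext c sp; by_cases h : sp.1 = sp.2 <;> simp [h]]
  rw [PySem.List.foldl_count_if]
  simp

-- Hamming count of equal-length lists as a count over index positions.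
theorem zip_count_eq_range (xs ys : List Char) (h : xs.length = ys.length) :
    (xs.zip ys).countP (fun ab => !(ab.1 == ab.2))
      = (List.range ys.length).countP (fun k => !(xs.getD k ' ' == ys.getD k ' ')) := by
  induction ys generalizing xs with
  | nil => simp
  | cons y ys ih =>
    cases xs with
    | nil => simp at h
    | cons x xs =>
      simp only [List.length_cons, Nat.add_right_cancel_iff] at h
      simp only [List.zip_cons_cons, List.length_cons, List.range_succ_eq_map,
        List.countP_cons, List.countP_map, Function.comp_def, List.getD_cons_succ,
        List.getD_cons_zero]
      simp [ih xs h, Nat.add_comm]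

-- the Hamming distance of window t of s against pattern, as a count over pattern positions.
theorem ham_window (pattern s : String) (i : Int)
    (h0 : 0 ≤ i) (h1 : i + PySem.Str.len pattern ≤ PySem.Str.len s) :
    pvHamming (PySem.Str.slice s (some i) (some (i + PySem.Str.len pattern))) pattern
      = (((List.range pattern.toList.length).countP
            (fun k => !(s.toList.getD (i.toNat + k) ' ' == pattern.toList.getD k ' '))) : Int) := by
  have hm : PySem.Str.len pattern = (pattern.toList.length : Int) := PySem.Str.len_eq pattern
  have hls : PySem.Str.len s = (s.toList.length : Int) := PySem.Str.len_eq s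
  rw [hm, hls] at h1
  have hw : (PySem.Str.slice s (some i) (some (i + PySem.Str.len pattern))).toList
      = (s.toList.drop i.toNat).take pattern.toList.length := by
    rw [hm, PySem.Str.toList_slice, PySem.Chars.slice_eq_listSlice,
        PySem.List.slice_toNat s.toList h0 (by omega)]
    congr 1
    omega
  have hwl : ((s.toList.drop i.toNat).take pattern.toList.length).length = pattern.toList.length := by
    rw [List.length_take, List.length_drop]
    omega
  rw [pvHamming_eq_countP, hw, zip_count_eq_range _ _ hwl]
  congr 1
  apply List.countP_congr
  intro k hk
  simp only [List.mem_range] at hk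
  have hk2 : i.toNat + k < s.toList.length := by omega
  have h2' : ((s.toList.drop i.toNat).take pattern.toList.length).getD k ' '
      = s.toList.getD (i.toNat + k) ' ' := by
    rw [List.getD_eq_getElem _ _ (by rw [hwl]; exact hk), List.getD_eq_getElem _ _ hk2,
        List.getElem_take, List.getElem_drop]
  rw [h2']

-- the index dict lists, per character, the pattern positions holding that character, in order.
theorem buildPos_getD (pL : List Char) (c : Char) :
    (pvBuildPos pL).getD c []
      = ((PySem.List.enumerate pL 0).filter (fun p => p.2 == c)).map (·.1) := by
  unfold pvBuildPos
  have h : (PySem.List.enumerate pL 0).foldl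
        (fun d p => d.modify p.2 ([] : List Int) (fun v => v ++ [p.1])) PySem.Dict.empty
      = ((PySem.List.enumerate pL 0).map (fun p : Int × Char => (p.2, p.1))).foldl
        (fun d q => d.modify q.1 [] (fun v => v ++ [q.2])) PySem.Dict.empty := by
    rw [List.foldl_map]
  rw [h, PySem.Dict.getD_foldl_modify_append]
  simp [List.filter_map, Function.comp_def]

theorem mem_buildPos (pL : List Char) (c : Char) (x : Int) :
    x ∈ (pvBuildPos pL).getD c [] ↔ 0 ≤ x ∧ x < (pL.length : Int) ∧ pL.getD x.toNat ' ' = c := by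
  rw [buildPos_getD]
  simp only [List.mem_map, List.mem_filter, PySem.List.mem_enumerate_iff]
  constructor
  · rintro ⟨p, ⟨⟨k, hk, rfl⟩, hc⟩, rfl⟩
    simp only [beq_iff_eq] at hc
    refine ⟨by omega, by omega, ?_⟩
    have hkk : ((0 : Int) + (k : Int)).toNat = k := by omega
    rw [hkk, List.getD_eq_getElem _ _ hk]
    exact hc
  · rintro ⟨hx0, hx1, hx2⟩
    refine ⟨(x, c), ⟨⟨x.toNat, by omega, ?_⟩, by simp⟩, rfl⟩
    rw [List.getD_eq_getElem _ _ (by omega : x.toNat < pL.length)] at hx2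
    rw [hx2, show ((0 : Int) + (x.toNat : Int)) = x from by omega]

theorem nodup_buildPos (pL : List Char) (c : Char) : ((pvBuildPos pL).getD c []).Nodup := by
  rw [buildPos_getD]
  have hp : ((PySem.List.enumerate pL 0).filter (fun p => p.2 == c)).Pairwise (fun p q => p.1 < q.1) :=
    (PySem.List.pairwise_lt_enumerate pL 0).filter _
  exact (List.pairwise_map.mpr hp).imp (fun h => ne_of_lt h)

-- flatten the nested scatter loop into a fold over the flat list of target indices.
theorem foldl_nested (pos : PySem.Dict Char (List Int)) (w : Int) (l : List (Int × Char)) (M0 : List Int) :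
    l.foldl (fun M p => (pos.getD p.2 []).foldl (fun M k => pvIncr w M (p.1 - k)) M) M0
      = (l.flatMap (fun p => (pos.getD p.2 []).map (fun k => p.1 - k))).foldl (pvIncr w) M0 := by
  induction l generalizing M0 with
  | nil => rfl
  | cons a l ih =>
    simp only [List.foldl_cons, List.flatMap_cons, List.foldl_append, ih, List.foldl_map]

theorem length_pvIncr (w : Int) (M : List Int) (i : Int) : (pvIncr w M i).length = M.length := by
  unfold pvIncr
  split
  · simp
  · simp

theorem length_foldl_incr (w : Int) (L : List Int) (M : List Int) :
    (L.foldl (pvIncr w) M).length = M.length := by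
  induction L generalizing M with
  | nil => rfl
  | cons i L ih => rw [List.foldl_cons, ih, length_pvIncr]

theorem foldl_incr_getD (w : Int) (L : List Int) (M : List Int) (t : Nat)
    (hM : t < M.length) (hw : (t : Int) < w) :
    (L.foldl (pvIncr w) M).getD t 0 = M.getD t 0 + (L.countP (fun i => i == (t : Int)) : Int) := by
  induction L generalizing M with
  | nil => simp
  | cons i L ih =>
    rw [List.foldl_cons, ih _ (by rw [length_pvIncr]; exact hM)]
    by_cases hit : i = (t : Int)
    · subst hit
      have hg : pvIncr w M (t : Int) = M.set t (M.getD t 0 + 1) := by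
        unfold pvIncr
        rw [if_pos ⟨by omega, hw⟩]
        simp
      rw [hg]
      have : (M.set t (M.getD t 0 + 1)).getD t 0 = M.getD t 0 + 1 := by
        rw [List.getD_eq_getElem _ _ (by simpa using hM), List.getElem_set_self]
      rw [this]
      simp only [List.countP_cons, beq_self_eq_true, if_true]
      push_cast
      ring
    · have hg : (pvIncr w M i).getD t 0 = M.getD t 0 := by
        unfold pvIncr
        split
        · next hcond =>
          have hne : i.toNat ≠ t := by omega
          simp [List.getD, List.getElem?_set_ne hne]
        · rfl
      rw [hg]
      have : (i :: L).countP (fun i => i == (t : Int)) = L.countP (fun i => i == (t : Int)) := by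
        simp [hit]
      rw [this]

-- counting a predicate over a flatMap, per outer element.
theorem countP_flatMap' {A B : Type} (p : B → Bool) (l : List A) (g : A → List B) :
    (l.flatMap g).countP p = (l.map (fun x => (g x).countP p)).sum := by
  induction l with
  | nil => rfl
  | cons a l ih => simp [List.flatMap_cons, List.countP_append, ih]

-- a 0/1 indicator sum over a list is a countP (Nat-valued version).
theorem sum_ite_prop_countP {A : Type} (P : A → Prop) [DecidablePred P] (l : List A) :
    (l.map (fun x => if P x then (1 : Nat) else 0)).sum = l.countP (fun x => decide (P x)) := by
  induction l with
  | nil => rfl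
  | cons a l ih =>
    simp only [List.map_cons, List.sum_cons, List.countP_cons, ih]
    by_cases h : P a <;> simp [h] <;> omega

-- a countP over range n whose predicate lives inside [t, t+m) collapses to a countP over range m.
theorem countP_range_shift (n t m : Nat) (Q : Nat → Bool) (hn : t + m ≤ n)
    (h1 : ∀ j, Q j = true → t ≤ j ∧ j < t + m) :
    (List.range n).countP Q = (List.range m).countP (fun k => Q (t + k)) := by
  have hsplit : n = t + m + (n - t - m) := by omega
  rw [hsplit, List.range_add, List.range_add, List.countP_append, List.countP_append,
      List.countP_map, List.countP_map]
  have hz1 : (List.range t).countP Q = 0 := by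
    rw [List.countP_eq_zero]
    intro j hj hQ
    have := h1 j hQ
    simp only [List.mem_range] at hj
    omega
  have hz2 : (List.range (n - t - m)).countP (Q ∘ fun u => t + m + u) = 0 := by
    rw [List.countP_eq_zero]
    intro u _ hQ
    simp only [Function.comp_apply] at hQ
    have := h1 _ hQ
    omega
  rw [hz1, hz2]
  simp [Function.comp_def]

-- the scatter pass counts, for window t, exactly the positions where s agrees with pattern.
theorem scatter_count (pattern s : String) (t : Nat)
    (hts : t + pattern.toList.length ≤ s.toList.length) :
    ((PySem.List.enumerate s.toList 0).flatMap
        (fun p => ((pvBuildPos pattern.toList).getD p.2 []).map (fun k => p.1 - k))).countP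
        (fun i => i == (t : Int))
      = (List.range pattern.toList.length).countP
          (fun k => s.toList.getD (t + k) ' ' == pattern.toList.getD k ' ') := by
  rw [countP_flatMap']
  have hinner : ∀ p : Int × Char,
      ((((pvBuildPos pattern.toList).getD p.2 []).map (fun k => p.1 - k)).countP (fun i => i == (t : Int)))
        = if 0 ≤ p.1 - (t : Int) ∧ p.1 - (t : Int) < (pattern.toList.length : Int)
             ∧ pattern.toList.getD (p.1 - (t : Int)).toNat ' ' = p.2 then 1 else 0 := by
    intro p
    rw [List.countP_map]
    simp only [Function.comp_def]
    have h1 : (((pvBuildPos pattern.toList).getD p.2 []).countP fun k => (p.1 - k) == (t : Int))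
        = ((pvBuildPos pattern.toList).getD p.2 []).count (p.1 - (t : Int)) := by
      rw [List.count]
      apply List.countP_congr
      intro a _
      simp only [beq_iff_eq]
      omega
    rw [h1]
    by_cases hmem : (p.1 - (t : Int)) ∈ (pvBuildPos pattern.toList).getD p.2 []
    · rw [List.count_eq_one_of_mem (nodup_buildPos _ _) hmem,
          if_pos ((mem_buildPos _ _ _).mp hmem)]
    · rw [List.count_eq_zero_of_not_mem hmem,
          if_neg (fun hc => hmem ((mem_buildPos _ _ _).mpr hc))]
  rw [List.map_congr_left (fun p _ => hinner p)]
  rw [show PySem.List.enumerate s.toList 0 = PySem.List.enumerate s.toList from rfl]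
  rw [PySem.List.enumerate_eq_map_pyRange s.toList ' ']
  rw [show PySem.List.len s.toList = (s.toList.length : Int) from rfl]
  rw [PySem.List.pyRange_zero_natCast, List.map_map, List.map_map]
  simp only [Function.comp_def, PySem.List.pyGetD_natCast]
  rw [sum_ite_prop_countP]
  rw [countP_range_shift s.toList.length t pattern.toList.length _
      hts
      (by
        intro j hQ
        rw [decide_eq_true_eq] at hQ
        omega)]
  apply List.countP_congr
  intro k hk
  simp only [List.mem_range] at hk
  have htk : ((t + k : Nat) : Int) - (t : Int) = (k : Int) := by push_cast; omega
  simp only [decide_eq_true_eq, beq_iff_eq, htk, Int.toNat_natCast]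
  constructor
  · rintro ⟨-, -, h⟩
    exact h.symm
  · intro h
    exact ⟨by omega, by exact_mod_cast hk, h.symm⟩

-- per-string agreement between A's window scan and B's scatter-count pass.
theorem string_agree (pattern s : String) (d : Int) :
    pvInnerA pattern s d (PySem.List.pyRange 0 (PySem.Str.len s - PySem.Str.len pattern + 1) 1)
      = pvAppearsB (pvBuildPos pattern.toList) (PySem.Str.len pattern) (PySem.Str.len pattern - d) s := by
  have hm : PySem.Str.len pattern = (pattern.toList.length : Int) := PySem.Str.len_eq pattern
  have hn : PySem.Str.len s = (s.toList.length : Int) := PySem.Str.len_eq s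
  show _ = ((PySem.List.enumerate s.toList 0).foldl
      (fun M p => (((pvBuildPos pattern.toList)).getD p.2 []).foldl (fun M k => pvIncr (PySem.Str.len s - PySem.Str.len pattern + 1) M (p.1 - k)) M)
      (PySem.List.pyRepeat [(0 : Int)] (PySem.Str.len s - PySem.Str.len pattern + 1))).any
      (fun v => decide (PySem.Str.len pattern - d ≤ v))
  rw [foldl_nested, PySem.List.pyRepeat_singleton]
  set w : Int := PySem.Str.len s - PySem.Str.len pattern + 1 with hwdef
  set mList : List Int := ((PySem.List.enumerate s.toList 0).flatMap
      (fun p => ((pvBuildPos pattern.toList).getD p.2 []).map (fun k => p.1 - k))).foldl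
      (pvIncr w) (List.replicate w.toNat 0) with hmldef
  have hlen : mList.length = w.toNat := by
    rw [hmldef, length_foldl_incr, List.length_replicate]
  by_cases hpos : 0 < w
  · -- key pointwise fact for every window start t
    have key : ∀ t : Nat, (t : Int) < w →
        ((PySem.Str.len pattern - d ≤ mList.getD t 0)
          ↔ pvHamming (PySem.Str.slice s (some (t : Int)) (some ((t : Int) + PySem.Str.len pattern))) pattern ≤ d) := by
      intro t ht
      have hts : t + pattern.toList.length ≤ s.toList.length := by omega
      have hrep : (List.replicate w.toNat (0 : Int)).getD t 0 = 0 := by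
        simp [List.getD, List.getElem?_replicate]
        split <;> rfl
      have hgd : mList.getD t 0
          = ((List.range pattern.toList.length).countP
              (fun k => s.toList.getD (t + k) ' ' == pattern.toList.getD k ' ') : Int) := by
        rw [hmldef, foldl_incr_getD w _ _ t (by simp; omega) ht, hrep, scatter_count pattern s t hts]
        simp
      have hham : pvHamming (PySem.Str.slice s (some (t : Int)) (some ((t : Int) + PySem.Str.len pattern))) pattern
          = (((List.range pattern.toList.length).countP
              (fun k => !(s.toList.getD (t + k) ' ' == pattern.toList.getD k ' '))) : Int) := by
        have := ham_window pattern s (t : Int) (by omega) (by omega)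
        rwa [Int.toNat_natCast] at this
      have hsum : pattern.toList.length
          = (List.range pattern.toList.length).countP (fun k => s.toList.getD (t + k) ' ' == pattern.toList.getD k ' ')
            + (List.range pattern.toList.length).countP (fun k => !(s.toList.getD (t + k) ' ' == pattern.toList.getD k ' ')) := by
        have h0 := List.length_eq_countP_add_countP
          (p := fun k => s.toList.getD (t + k) ' ' == pattern.toList.getD k ' ')
          (l := List.range pattern.toList.length)
        rw [List.length_range] at h0
        have hneg : (List.range pattern.toList.length).countP
              (fun k => !(s.toList.getD (t + k) ' ' == pattern.toList.getD k ' '))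
            = (List.range pattern.toList.length).countP
              (fun a => decide ¬((s.toList.getD (t + a) ' ' == pattern.toList.getD a ' ') = true)) := by
          apply List.countP_congr
          intro a _
          simp
        rw [hneg]
        exact h0
      rw [hgd, hham, hm]
      omega
    rw [pvInnerA_eq_any]
    have hiff : ((PySem.List.pyRange 0 w 1).any (fun i =>
          pvHamming (PySem.Str.slice s (some i) (some (i + PySem.Str.len pattern))) pattern ≤ d) = true)
        ↔ (mList.any (fun v => decide (PySem.Str.len pattern - d ≤ v)) = true) := by
      rw [List.any_eq_true, List.any_eq_true]
      constructor
      · rintro ⟨i, hi, hHi⟩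
        rw [PySem.List.mem_pyRange_one] at hi
        have hti : ((i.toNat : Int)) = i := Int.toNat_of_nonneg hi.1
        have htl : i.toNat < mList.length := by rw [hlen]; omega
        refine ⟨mList.getD i.toNat 0, ?_, ?_⟩
        · rw [List.getD_eq_getElem _ _ htl]
          exact List.getElem_mem htl
        · rw [decide_eq_true_eq]
          apply (key i.toNat (by omega)).mpr
          rw [hti]
          exact of_decide_eq_true hHi
      · rintro ⟨v, hv, hneed⟩
        obtain ⟨t, ht, rfl⟩ := List.mem_iff_getElem.mp hv
        have htw : (t : Int) < w := by rw [hlen] at ht; omega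
        refine ⟨(t : Int), ?_, ?_⟩
        · rw [PySem.List.mem_pyRange_one]
          exact ⟨by omega, htw⟩
        · rw [decide_eq_true_eq]
          apply (key t htw).mp
          rw [List.getD_eq_getElem _ _ ht]
          exact of_decide_eq_true hneed
    exact Bool.eq_iff_iff.mpr (by simpa using hiff)
  · have hw0 : w ≤ 0 := by omega
    have hrange : PySem.List.pyRange 0 w 1 = [] := by
      apply List.eq_nil_iff_forall_not_mem.mpr
      intro x hx
      rw [PySem.List.mem_pyRange_one] at hx
      omega
    have hM : mList = [] := by
      apply List.eq_nil_of_length_eq_zero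
      rw [hlen]
      omega
    rw [hrange, hM]
    rfl

-- ===== VERDICT (by name: the statement is the Claim_ definition above) =====
theorem PatternAppearsInEachDnaWithAtMostDMismatches_spec : Claim_equal_PatternAppearsInEachDnaWithAtMostDMismatches := by
  intro pattern Dna d _
  unfold Spec_PatternAppearsInEachDnaWithAtMostDMismatches
  unfold PatternAppearsInEachDnaWithAtMostDMismatches PatternAppearsInEachDnaWithAtMostDMismatches_alt
  simp only [PySem.List.foldl_append_singleton_eq_map, List.nil_append, pvCheckA_eq_all, List.all_map]
  refine congrArg (List.all Dna) ?_
  funext s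
  simp only [Function.comp_apply, id]
  exact string_agree pattern s d
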